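-- pv_equiv track=rewrite | github.com/plasma-umass/pythoness | eval/leetcode/leetcode_controller.py | remove_imports
-- ===== SOURCE A (Python) =====
-- def remove_imports(code):
--     # Split the multiline string into lines
--     lines = code.splitlines()
--
--     # List to store the resulting lines after removing the imports
--     result_lines = []
--
--     # Flag to determine if we've reached the function definition
--     reached_def = False
--
--     # Loop through each line
--     for line in lines:
--         if reached_def:
--             result_lines.append(line)  # Add all lines after reaching 'def'
--         elif line.strip().startswith(("from", "import")):
--             continue  # Skip the lines starting with 'from' or 'import'
--         elif line.strip().startswith("def "):
--             reached_def = (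
--                 True  # Stop skipping lines once we reach a function definition
--             )
--             result_lines.append(line)  # Add the function definition itself
--
--     # Join the remaining lines back into a single string
--     return "\n".join(result_lines)
-- ===== SOURCE B (Python) =====
-- def remove_imports(code):
--     # Every line before the first function-definition line is dropped by A (the import test is
--     # redundant), so: find the first def line and keep the tail from there.
--     lines = code.splitlines()
--     for i, line in enumerate(lines):
--         if line.strip().startswith("def "):
--             return "\n".join(lines[i:])
--     return ""
-- ===== Notes on version B (the rewrite author's own statement) =====
-- stated objective: simpler
-- what changed: B replaces A's stateful flag loop (skip imports, flip a reached_def flag, append lines) with a single scan for the index of the first function-definition line and a join of the tail slice, since A in fact drops every line before that one.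
import Mathlib
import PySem

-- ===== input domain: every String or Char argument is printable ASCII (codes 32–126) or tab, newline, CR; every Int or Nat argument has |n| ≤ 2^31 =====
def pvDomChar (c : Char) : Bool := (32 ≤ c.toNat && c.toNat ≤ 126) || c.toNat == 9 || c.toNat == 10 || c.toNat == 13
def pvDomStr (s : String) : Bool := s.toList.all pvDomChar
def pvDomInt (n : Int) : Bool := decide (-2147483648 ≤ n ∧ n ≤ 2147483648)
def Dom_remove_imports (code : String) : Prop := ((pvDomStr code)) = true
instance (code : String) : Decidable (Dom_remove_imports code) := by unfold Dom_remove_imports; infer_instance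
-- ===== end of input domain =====

-- B scans for the first function-definition line and joins the tail (A's flag loop drops every earlier line anyway): simpler decomposition.

-- ===== PORT A =====
def remove_imports (code : String) : String :=
  let lines := PySem.Str.splitlines code
  let result :=
    lines.foldl (fun (st : Bool × List String) line =>
      if st.1 then (st.1, st.2 ++ [line])
      else if PySem.Str.startswith (PySem.Str.strip line) "from" ||
              PySem.Str.startswith (PySem.Str.strip line) "import" then st
      else if PySem.Str.startswith (PySem.Str.strip line) "def " then (true, st.2 ++ [line])
      else st) (false, [])
  PySem.Str.join "\n" result.2

-- ===== PORT B =====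
-- the scan of Source B: first suffix starting with a 'def '-line (empty if none)
def pvDefTail (lines : List String) : List String :=
  match lines with
  | [] => []
  | l :: rest =>
      if PySem.Str.startswith (PySem.Str.strip l) "def " then l :: rest
      else pvDefTail rest

def remove_imports_alt (code : String) : String :=
  PySem.Str.join "\n" (pvDefTail (PySem.Str.splitlines code))

-- ===== PRECONDITION & SPEC =====
def Spec_remove_imports (code : String) (out : String) : Prop := out = remove_imports_alt code
instance (code : String) (out : String) : Decidable (Spec_remove_imports code out) := by unfold Spec_remove_imports; infer_instance

-- ===== CLAIM (what is proved, stated in full; the proofs are below) =====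
def Claim_equal_remove_imports : Prop := ∀ (code : String), Dom_remove_imports code → Spec_remove_imports code (remove_imports code)

-- ===== LEMMAS AND PROOFS =====

-- once the flag is true, A's loop appends every remaining line
theorem pv_foldl_true (ls : List String) (acc : List String) :
    ls.foldl (fun (st : Bool × List String) line =>
      if st.1 then (st.1, st.2 ++ [line])
      else if PySem.Str.startswith (PySem.Str.strip line) "from" ||
              PySem.Str.startswith (PySem.Str.strip line) "import" then st
      else if PySem.Str.startswith (PySem.Str.strip line) "def " then (true, st.2 ++ [line])
      else st) (true, acc) = (true, acc ++ ls) := by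
  induction ls generalizing acc with
  | nil => simp
  | cons l rest ih =>
    rw [List.foldl_cons, if_pos rfl, ih]
    simp

-- a line that starts with "def " starts with neither "from" nor "import"
theorem pv_def_not_imp (s : String)
    (h : PySem.Str.startswith s "def " = true) :
    PySem.Str.startswith s "from" = false ∧ PySem.Str.startswith s "import" = false := by
  simp only [PySem.Str.startswith_eq] at *
  rw [PySem.Chars.startswith_iff] at h
  obtain ⟨u, hu⟩ := h
  constructor <;>
  · rw [← Bool.not_eq_true, PySem.Chars.startswith_iff, ← hu]
    intro hp
    simp [List.cons_prefix_cons] at hp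

-- A's loop from the unreached state collects exactly B's tail
theorem pv_main (ls : List String) :
    (ls.foldl (fun (st : Bool × List String) line =>
      if st.1 then (st.1, st.2 ++ [line])
      else if PySem.Str.startswith (PySem.Str.strip line) "from" ||
              PySem.Str.startswith (PySem.Str.strip line) "import" then st
      else if PySem.Str.startswith (PySem.Str.strip line) "def " then (true, st.2 ++ [line])
      else st) (false, [])).2 = pvDefTail ls := by
  induction ls with
  | nil => simp [pvDefTail]
  | cons l rest ih =>
    rw [List.foldl_cons]
    by_cases hdef : PySem.Str.startswith (PySem.Str.strip l) "def " = true
    · obtain ⟨h1, h2⟩ := pv_def_not_imp _ hdef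
      simp only [h1, h2, hdef, Bool.or_self, Bool.false_eq_true, if_false, if_true,
        pvDefTail, pv_foldl_true]
      simp
    · by_cases himp : (PySem.Str.startswith (PySem.Str.strip l) "from" ||
              PySem.Str.startswith (PySem.Str.strip l) "import") = true
      · simp only [himp, Bool.false_eq_true, if_false, if_true]
        rw [ih]
        simp only [pvDefTail, hdef, Bool.false_eq_true, if_false]
      · simp only [himp, hdef, Bool.false_eq_true, if_false]
        rw [ih]
        simp only [pvDefTail, hdef, Bool.false_eq_true, if_false]

-- ===== VERDICT (by name: the statement is the Claim_ definition above) =====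
theorem remove_imports_spec : Claim_equal_remove_imports := by
  intro code _
  unfold Spec_remove_imports
  simp only [remove_imports, remove_imports_alt]
  rw [pv_main]
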